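-- pv_equiv track=rewrite | github.com/k-min9/TIL | 00. Daily Algorithm/BOJ/BOJ2922_Gd4_즐거운단어.py | check
-- ===== SOURCE A (Python) =====
-- def check(str):
--     str = ''.join(str)
--     # L 포함 여부 및 변환
--     if 'L' not in str:
--         return False
--     while 'L' in str:
--         str = str.replace('L', 'B')
--
--     # 체크
--     if 'AAA' in str:
--         return False
--     if 'BBB' in str:
--         return False
--
--     return True
-- ===== SOURCE B (Python) =====
-- def check(str):
--     s = ''.join(str)
--     has_l = False
--     prev = None
--     run = 0
--     for ch in s:
--         if ch == 'L':
--             has_l = True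
--             c = 'B'
--         else:
--             c = ch
--         if c == prev:
--             run += 1
--         else:
--             prev = c
--             run = 1
--         if run == 3 and (c == 'A' or c == 'B'):
--             return False
--     return has_l
-- ===== Notes on version B (the rewrite author's own statement) =====
-- stated objective: alternative
-- what changed: Replaces the replace-until-no-L loop plus two substring 'in' scans with a single stateful left-to-right pass that maps L to B on the fly, tracks whether an L was seen and the current run length, and returns False as soon as a run of three A's or B's appears.
import Mathlib
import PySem

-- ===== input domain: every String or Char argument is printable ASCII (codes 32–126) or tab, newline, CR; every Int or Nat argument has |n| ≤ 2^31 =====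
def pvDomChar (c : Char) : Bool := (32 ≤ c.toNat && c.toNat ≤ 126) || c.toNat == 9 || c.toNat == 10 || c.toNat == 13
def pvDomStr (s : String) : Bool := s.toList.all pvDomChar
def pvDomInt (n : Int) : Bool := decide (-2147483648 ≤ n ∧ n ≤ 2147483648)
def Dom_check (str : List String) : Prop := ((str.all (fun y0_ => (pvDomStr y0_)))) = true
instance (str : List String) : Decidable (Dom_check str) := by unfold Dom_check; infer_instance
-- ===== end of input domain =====

-- B is a genuinely different decomposition: one stateful scan (has_L flag + run length, L read as B)
-- instead of A's replace-until-no-L loop followed by two substring checks; return value only, no mutation.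

-- ===== PORT A =====
-- termination lemma for the 'while "L" in str' loop: replacing all L's by B's zeroes the L-count
theorem pvReplaceGo_L (l acc : List Char) (fuel : Nat) (h : l.length ≤ fuel) :
    PySem.Chars.replace.go ['L'] ['B'] fuel l acc
      = acc.reverse ++ l.map (fun c => if c == 'L' then 'B' else c) := by
  induction l generalizing fuel acc with
  | nil => cases fuel <;> simp [PySem.Chars.replace.go]
  | cons c t ih =>
    cases fuel with
    | zero => simp at h
    | succ m =>
      simp only [List.length_cons, Nat.succ_le_succ_iff] at h
      by_cases hc : c = 'L'
      · subst hc
        simp [PySem.Chars.replace.go, List.isPrefixOf, ih _ _ h]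
      · have hLc : ('L' = c → 'B' = c) := fun h => absurd h.symm hc
        simp [PySem.Chars.replace.go, List.isPrefixOf, hc, ih _ _ h]
        exact hLc

theorem pvReplace_L (s : List Char) :
    PySem.Chars.replace s ['L'] ['B'] = s.map (fun c => if c == 'L' then 'B' else c) := by
  simp [PySem.Chars.replace, pvReplaceGo_L s [] s.length le_rfl]

theorem pvReplace_count_lt (s : List Char) (h : PySem.Chars.isIn ['L'] s = true) :
    (PySem.Chars.replace s ['L'] ['B']).count 'L' < s.count 'L' := by
  have hmem : 'L' ∈ s := by
    have := (PySem.Chars.isIn_iff_infix (sub := ['L']) (s := s)).mp h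
    exact this.subset (by simp)
  have h0 : (PySem.Chars.replace s ['L'] ['B']).count 'L' = 0 := by
    rw [pvReplace_L]
    rw [List.count_eq_zero]
    intro hx
    rcases List.mem_map.mp hx with ⟨c, _, hc⟩
    by_cases h' : c = 'L' <;> simp [h'] at hc
  rw [h0]
  exact List.count_pos_iff.mpr hmem

def pvWhileRepl (s : List Char) : List Char :=
  if PySem.Chars.isIn ['L'] s then pvWhileRepl (PySem.Chars.replace s ['L'] ['B']) else s
termination_by s.count 'L'
decreasing_by exact pvReplace_count_lt s (by assumption)

def check (str : List String) : Bool :=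
  let s := PySem.Chars.join [] (str.map String.toList)   -- ''.join(str)
  if !(PySem.Chars.isIn ['L'] s) then false              -- if 'L' not in str: return False
  else
    let s := pvWhileRepl s                               -- while 'L' in str: str = str.replace('L','B')
    if PySem.Chars.isIn ['A','A','A'] s then false       -- if 'AAA' in str: return False
    else if PySem.Chars.isIn ['B','B','B'] s then false  -- if 'BBB' in str: return False
    else true

-- ===== PORT B =====
def pvScan : Bool → Option Char → Int → List Char → Bool
  | hasL, _, _, [] => hasL
  | hasL, prev, run, ch :: rest =>
    let hasL' := if ch == 'L' then true else hasL
    let c := if ch == 'L' then 'B' else ch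
    let pr := if some c == prev then (prev, run + 1) else (some c, (1 : Int))
    if pr.2 == 3 && (c == 'A' || c == 'B') then false
    else pvScan hasL' pr.1 pr.2 rest

def check_alt (str : List String) : Bool :=
  pvScan false none 0 (str.flatMap String.toList)

-- ===== PRECONDITION & SPEC =====
def Spec_check (str : List String) (out : Bool) : Prop := out = check_alt str
instance (str : List String) (out : Bool) : Decidable (Spec_check str out) := by unfold Spec_check; infer_instance

-- ===== CLAIM (what is proved, stated in full; the proofs are below) =====
def Claim_equal_check : Prop := ∀ (str : List String), Dom_check str → Spec_check str (check str)

-- ===== LEMMAS AND PROOFS =====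
def pvF (c : Char) : Char := if c == 'L' then 'B' else c

def pvTrip (m : List Char) : Bool :=
  PySem.Chars.isIn ['A','A','A'] m || PySem.Chars.isIn ['B','B','B'] m

theorem pvTrip_iff (m : List Char) :
    pvTrip m = true ↔ (['A','A','A'] <:+: m ∨ ['B','B','B'] <:+: m) := by
  simp [pvTrip, PySem.Chars.isIn_iff_infix]

theorem pvInfix_replicate_cons {x c c' : Char} {k : Nat} {m : List Char}
    (hne : c' ≠ c) (hk : x = c → k ≤ 2) :
    ([x,x,x] <:+: List.replicate k c ++ c' :: m ↔ [x,x,x] <:+: c' :: m) := by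
  induction k with
  | zero => simp
  | succ n ih =>
    constructor
    · intro h
      rw [List.replicate_succ, List.cons_append, List.infix_cons_iff] at h
      rcases h with hpre | hinf
      · rw [List.cons_prefix_cons] at hpre
        obtain ⟨hx, hpre⟩ := hpre
        subst hx
        have hn2 : n + 1 ≤ 2 := hk rfl
        have hn1 : n ≤ 1 := by omega
        interval_cases n
        · simp only [List.replicate, List.nil_append, List.cons_prefix_cons] at hpre
          exact absurd hpre.1.symm hne
        · simp only [List.replicate, List.cons_append, List.nil_append,
              List.cons_prefix_cons] at hpre
          exact absurd hpre.2.1.symm hne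
      · exact (ih (fun hx => by have := hk hx; omega)).mp hinf
    · intro h
      exact h.trans (List.suffix_append _ _).isInfix

theorem pvTrip_replicate_cons {c c' : Char} {k : Nat} {m : List Char}
    (hne : c' ≠ c) (hk : (c = 'A' ∨ c = 'B') → k ≤ 2) :
    pvTrip (List.replicate k c ++ c' :: m) = pvTrip (c' :: m) := by
  rw [Bool.eq_iff_iff, pvTrip_iff, pvTrip_iff]
  constructor
  · rintro (h | h)
    · exact Or.inl ((pvInfix_replicate_cons hne (fun hx => hk (Or.inl hx.symm))).mp h)
    · exact Or.inr ((pvInfix_replicate_cons hne (fun hx => hk (Or.inr hx.symm))).mp h)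
  · rintro (h | h)
    · exact Or.inl (h.trans (List.suffix_append _ _).isInfix)
    · exact Or.inr (h.trans (List.suffix_append _ _).isInfix)

theorem pvTrip_replicate {c : Char} {k : Nat} (hk : (c = 'A' ∨ c = 'B') → k ≤ 2) :
    pvTrip (List.replicate k c) = false := by
  rw [Bool.eq_false_iff]
  intro h
  rcases (pvTrip_iff _).mp h with h3 | h3
  · have hmem : 'A' ∈ List.replicate k c := h3.subset (by simp)
    have hc : c = 'A' := ((List.eq_of_mem_replicate hmem)).symm
    have hlen := h3.length_le
    rw [List.length_replicate] at hlen
    have h3k : (3 : Nat) ≤ k := by simpa using hlen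
    have := hk (Or.inl hc)
    omega
  · have hmem : 'B' ∈ List.replicate k c := h3.subset (by simp)
    have hc : c = 'B' := ((List.eq_of_mem_replicate hmem)).symm
    have hlen := h3.length_le
    rw [List.length_replicate] at hlen
    have h3k : (3 : Nat) ≤ k := by simpa using hlen
    have := hk (Or.inr hc)
    omega

theorem pvTrip_fire {c : Char} (m : List Char) (hc : c = 'A' ∨ c = 'B') :
    pvTrip (List.replicate 2 c ++ c :: m) = true := by
  have hrep : List.replicate 2 c ++ c :: m = c :: c :: c :: m := by simp [List.replicate]
  have hpref : [c,c,c] <+: c :: c :: c :: m := ⟨m, rfl⟩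
  rw [hrep, pvTrip_iff]
  rcases hc with rfl | rfl
  · exact Or.inl hpref.isInfix
  · exact Or.inr hpref.isInfix

theorem pvScan_main (s : List Char) (hasL : Bool) (c : Char) (k : Nat)
    (h1 : 1 ≤ k) (h2 : (c = 'A' ∨ c = 'B') → k ≤ 2) :
    pvScan hasL (some c) (k : Int) s
      = ((hasL || s.contains 'L') && !pvTrip (List.replicate k c ++ s.map pvF)) := by
  induction s generalizing hasL c k with
  | nil => simp [pvScan, pvTrip_replicate h2]
  | cons ch rest ih =>
    simp only [pvScan]
    by_cases hcc : (if ch == 'L' then 'B' else ch) = c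
    · have hf : pvF ch = c := hcc
      rw [hcc]
      simp only [BEq.rfl, if_true]
      by_cases hfire : ((k : Int) + 1 == 3 && (c == 'A' || c == 'B')) = true
      · rw [if_pos hfire]
        have hk3 : k = 2 := by
          have h3 : (k : Int) + 1 = 3 := by
            have := ((Bool.and_eq_true _ _).mp hfire).1; simpa using this
          omega
        have hAB : c = 'A' ∨ c = 'B' := by
          have := ((Bool.and_eq_true _ _).mp hfire).2
          rcases (Bool.or_eq_true _ _).mp this with h | h
          · exact Or.inl (by simpa using h)
          · exact Or.inr (by simpa using h)
        subst hk3
        have hm : (ch :: rest).map pvF = c :: rest.map pvF := by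
          rw [List.map_cons, hf]
        rw [hm, pvTrip_fire _ hAB]
        simp
      · rw [if_neg hfire]
        have hk2 : (c = 'A' ∨ c = 'B') → k + 1 ≤ 2 := by
          intro hAB
          have hk := h2 hAB
          by_contra hgt
          apply hfire
          have hk3 : k = 2 := by omega
          subst hk3
          rcases hAB with rfl | rfl <;> decide
        have hcast : (k : Int) + 1 = ((k + 1 : Nat) : Int) := by push_cast; ring
        rw [hcast, ih _ c (k + 1) (by omega) hk2]
        have hrep : List.replicate (k + 1) c ++ rest.map pvF
            = List.replicate k c ++ (ch :: rest).map pvF := by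
          rw [List.replicate_succ', List.append_assoc, List.map_cons, hf]
          rfl
        rw [hrep]
        cases hchL : (ch == 'L') with
        | true =>
          have heq : ch = 'L' := by simpa using hchL
          simp [hchL, List.contains_cons, heq]
        | false =>
          have hneq : ¬ ('L' = ch) := fun h => absurd h.symm (by simpa using hchL)
          simp [hchL, List.contains_cons, hneq]
    · have hf : pvF ch ≠ c := hcc
      have hne : (some (if ch == 'L' then 'B' else ch) == some c) = false := by
        rw [show (if ch == 'L' then 'B' else ch) = pvF ch from rfl]
        simp [hf]
      rw [hne]
      simp only [Bool.false_eq_true, if_false]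
      have h13 : ((1 : Int) == 3 && ((if ch == 'L' then 'B' else ch) == 'A'
          || (if ch == 'L' then 'B' else ch) == 'B')) = false := by
        simp
      rw [h13]
      simp only [Bool.false_eq_true, if_false]
      rw [show (1 : Int) = ((1 : Nat) : Int) by norm_num,
          ih _ (if ch == 'L' then 'B' else ch) 1 le_rfl (fun _ => by omega)]
      have htr : pvTrip (List.replicate k c ++ (ch :: rest).map pvF)
          = pvTrip (List.replicate 1 (if ch == 'L' then 'B' else ch) ++ rest.map pvF) := by
        have hm : (ch :: rest).map pvF = pvF ch :: rest.map pvF := List.map_cons ..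
        rw [hm, pvTrip_replicate_cons hf h2]
        rfl
      rw [htr]
      cases hchL : (ch == 'L') with
      | true =>
        have heq : ch = 'L' := by simpa using hchL
        simp [hchL, List.contains_cons, heq]
      | false =>
        have hneq : ¬ ('L' = ch) := fun h => absurd h.symm (by simpa using hchL)
        simp [hchL, List.contains_cons, hneq]

theorem pvJoin_nil (l : List (List Char)) : PySem.Chars.join [] l = l.flatten := by
  show ([] : List Char).intercalate l = l.flatten
  induction l with
  | nil => rfl
  | cons a t ih =>
    cases t with
    | nil => simp [List.intercalate]
    | cons b u =>
      simp only [List.intercalate, List.intersperse] at *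
      simp_all

theorem pvMap_no_L (s : List Char) :
    PySem.Chars.isIn ['L'] (s.map pvF) = false := by
  rw [PySem.Chars.isIn_eq_false_iff]
  intro h
  have hmem : 'L' ∈ s.map pvF := h.subset (by simp)
  rcases List.mem_map.mp hmem with ⟨c, _, hc⟩
  by_cases h' : c = 'L' <;> simp [pvF, h'] at hc

theorem pvWhileRepl_eval (s : List Char) (h : PySem.Chars.isIn ['L'] s = true) :
    pvWhileRepl s = s.map pvF := by
  rw [pvWhileRepl, if_pos h, pvReplace_L]
  rw [show (fun c => if c == 'L' then 'B' else c) = pvF from rfl]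
  rw [pvWhileRepl, pvMap_no_L]
  simp

theorem pvIsIn_L (s : List Char) :
    PySem.Chars.isIn ['L'] s = s.contains 'L' := by
  rw [Bool.eq_iff_iff, PySem.Chars.isIn_iff_infix, List.singleton_infix_iff,
      List.contains_eq_mem]
  simp

theorem check_eq (str : List String) : check str = check_alt str := by
  unfold check check_alt
  rw [pvJoin_nil, show (str.map String.toList).flatten = str.flatMap String.toList from rfl]
  generalize str.flatMap String.toList = s
  cases s with
  | nil =>
    have h : PySem.Chars.isIn ['L'] ([] : List Char) = false := by decide
    simp [h, pvScan]
  | cons ch rest =>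
    simp only [pvScan]
    have hnone : (some (if ch == 'L' then 'B' else ch) == (none : Option Char)) = false := by
      rfl
    rw [hnone]
    simp only [Bool.false_eq_true, if_false]
    have h13 : ((1 : Int) == 3 && ((if ch == 'L' then 'B' else ch) == 'A'
        || (if ch == 'L' then 'B' else ch) == 'B')) = false := by simp
    rw [h13]
    simp only [Bool.false_eq_true, if_false]
    rw [show (1 : Int) = ((1 : Nat) : Int) by norm_num,
        pvScan_main rest _ _ 1 le_rfl (fun _ => by omega)]
    have hmapc : List.replicate 1 (if ch == 'L' then 'B' else ch) ++ rest.map pvF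
        = (ch :: rest).map pvF := by
      rw [List.map_cons]
      rfl
    rw [hmapc]
    by_cases hL : PySem.Chars.isIn ['L'] (ch :: rest) = true
    · rw [if_neg (by simp [hL]), pvWhileRepl_eval _ hL]
      have hcontains : (ch :: rest).contains 'L' = true := by rw [← pvIsIn_L]; exact hL
      have hstep : ((if ch == 'L' then true else false) || rest.contains 'L') = true := by
        cases hchL : (ch == 'L') with
        | true => simp [hchL]
        | false =>
          have hmem : 'L' ∈ rest := by
            rw [List.contains_cons] at hcontains
            have h' : 'L' = ch ∨ 'L' ∈ rest := by simpa using hcontains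
            rcases h' with h' | h'
            · exact absurd h'.symm (by simpa using hchL)
            · exact h'
          simp only [hchL, Bool.false_eq_true, if_false, Bool.false_or]
          simpa using hmem
      rw [hstep]
      cases hAAA : PySem.Chars.isIn ['A','A','A'] ((ch :: rest).map pvF) <;>
        cases hBBB : PySem.Chars.isIn ['B','B','B'] ((ch :: rest).map pvF) <;>
        simp only [pvTrip, hAAA, hBBB] <;> simp
    · have hLf : PySem.Chars.isIn ['L'] (ch :: rest) = false := Bool.eq_false_iff.mpr hL
      rw [if_pos (by simp [hLf])]
      have hcontains : (ch :: rest).contains 'L' = false := by rw [← pvIsIn_L]; exact hLf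
      have hstep : ((if ch == 'L' then true else false) || rest.contains 'L') = false := by
        rw [List.contains_cons] at hcontains
        rcases Bool.or_eq_false_iff.mp hcontains with ⟨hc1, hc2⟩
        have hch : (ch == 'L') = false :=
          beq_eq_false_iff_ne.mpr (fun h => ((by simpa using hc1 : ¬ 'L' = ch)) h.symm)
        rw [hch, hc2]
        simp
      rw [hstep]
      simp

-- ===== VERDICT (by name: the statement is the Claim_ definition above) =====
theorem check_spec : Claim_equal_check := by
  intro str _
  unfold Spec_check
  exact check_eq str
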